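-- pv_equiv track=rewrite | github.com/George-lewis/pyobfuscate | source/main.py | increment_name
-- ===== SOURCE A (Python) =====
-- def replace(s: str, pos: int, sub: str) -> str:
--     return s[:pos] + sub + s[pos + len(s) + 1:]
--
-- alphabet = "abcdefghijklmnopqrstuvwxyz"
--
-- def increment_name(name: str, pos: int) -> str:
--     idx = alphabet.index(name[pos])
--     if idx == len(alphabet) - 1:
--         name = replace(name, pos, alphabet[0])
--         if pos*-1 == len(name):
--             name = alphabet[0] + name
--             return name
--         return increment_name(name, pos - 1)
--     else:
--         return replace(name, pos, alphabet[idx + 1])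
-- ===== SOURCE B (Python) =====
-- alphabet = "abcdefghijklmnopqrstuvwxyz"
--
-- def increment_name(name: str, pos: int) -> str:
--     while name[pos] == 'z':
--         name = name[:pos] + 'a' + name[pos + len(name) + 1:]
--         if -pos == len(name):
--             return 'a' + name
--         pos -= 1
--     return name[:pos] + alphabet[alphabet.index(name[pos]) + 1] + name[pos + len(name) + 1:]
-- ===== Notes on version B (the rewrite author's own statement) =====
-- stated objective: simpler
-- what changed: A's recursive carry (with the replace() helper) becomes a plain while-loop: the string rebuild is inlined as slices, the carry test is a direct name[pos] == 'z' comparison instead of comparing alphabet.index against len(alphabet)-1, and the helper disappears; Pre_ excludes exactly the inputs where A raises (pos out of range, or the first non-'z' character scanned leftwards not in 'a'..'y').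
import Mathlib
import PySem

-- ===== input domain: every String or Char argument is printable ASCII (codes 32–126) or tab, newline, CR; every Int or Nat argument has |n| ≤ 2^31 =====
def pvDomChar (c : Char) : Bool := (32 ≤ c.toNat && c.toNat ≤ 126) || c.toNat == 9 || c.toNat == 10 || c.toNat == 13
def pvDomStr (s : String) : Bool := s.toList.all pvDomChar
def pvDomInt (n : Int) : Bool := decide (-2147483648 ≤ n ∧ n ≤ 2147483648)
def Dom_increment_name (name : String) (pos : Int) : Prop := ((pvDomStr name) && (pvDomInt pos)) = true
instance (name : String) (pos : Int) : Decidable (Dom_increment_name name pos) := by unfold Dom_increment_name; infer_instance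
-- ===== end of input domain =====

-- B replaces A's recursive carry (and its replace() helper) by a plain while-loop with the
-- string rebuild inlined as slices (objective: simpler, same cost).

-- ===== PORT A =====
-- alphabet = "abcdefghijklmnopqrstuvwxyz"
def abet : List Char := "abcdefghijklmnopqrstuvwxyz".toList

-- def replace(s, pos, sub): return s[:pos] + sub + s[pos + len(s) + 1:]
def pyReplace (s : List Char) (pos : Int) (sub : List Char) : List Char :=
  PySem.List.slice s none (some pos) ++ sub ++
    PySem.List.slice s (some (pos + (s.length : Int) + 1)) none

-- A, on the code points (name[pos] → pyGet?, a raise → []: IndexError from name[pos],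
-- ValueError from alphabet.index). The Nat argument of incAGo is a fuel bound making the
-- recursion structural; incA supplies enough fuel for every call chain (each recursive call
-- strictly shrinks (pos + len).toNat, so (pos + len + 1).toNat steps always suffice).
def incAGo : Nat → List Char → Int → List Char
  | 0, _, _ => []                           -- never reached with the fuel incA supplies
  | fuel + 1, s, pos =>
    match PySem.List.pyGet? s pos with
    | none => []                            -- IndexError: name[pos]
    | some c =>
      let idx := PySem.Chars.find abet [c]  -- alphabet.index(name[pos])
      if idx < 0 then []                    -- ValueError
      else if idx = (abet.length : Int) - 1 then
        let s' := pyReplace s pos ['a']     -- alphabet[0] = 'a'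
        if pos * -1 = (s'.length : Int) then
          'a' :: s'                         -- name = alphabet[0] + name
        else incAGo fuel s' (pos - 1)
      else
        pyReplace s pos [(PySem.List.pyGet? abet (idx + 1)).getD 'a']   -- alphabet[idx+1]

def incA (s : List Char) (pos : Int) : List Char :=
  incAGo (pos + (s.length : Int) + 1).toNat s pos

def increment_name (name : String) (pos : Int) : String :=
  String.ofList (incA name.toList pos)

-- ===== PORT B =====
-- B's while-loop over the state (name, pos); the Nat argument is the same fuel bound as A's
-- ((pos + len).toNat shrinks at every iteration). A raise → []: IndexError from name[pos],
-- ValueError from alphabet.index(name[pos]).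
def incBGo : Nat → List Char → Int → List Char
  | 0, _, _ => []                           -- never reached with the fuel incB supplies
  | fuel + 1, s, pos =>
    match PySem.List.pyGet? s pos with      -- while name[pos] == 'z':
    | none => []                            -- IndexError: name[pos]
    | some c =>
      if c = 'z' then
        -- name = name[:pos] + 'a' + name[pos + len(name) + 1:]
        let s' := PySem.List.slice s none (some pos) ++ ['a'] ++
                  PySem.List.slice s (some (pos + (s.length : Int) + 1)) none
        if -pos = (s'.length : Int) then
          'a' :: s'                         -- return 'a' + name
        else incBGo fuel s' (pos - 1)       -- pos -= 1; continue
      else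
        let idx := PySem.Chars.find abet [c]   -- alphabet.index(name[pos])
        if idx < 0 then []                  -- ValueError
        else
          -- name[:pos] + alphabet[idx + 1] + name[pos + len(name) + 1:]
          PySem.List.slice s none (some pos) ++
            [(PySem.List.pyGet? abet (idx + 1)).getD 'a'] ++
            PySem.List.slice s (some (pos + (s.length : Int) + 1)) none

def incB (s : List Char) (pos : Int) : List Char :=
  incBGo (pos + (s.length : Int) + 1).toNat s pos

def increment_name_alt (name : String) (pos : Int) : String :=
  String.ofList (incB name.toList pos)

-- ===== PRECONDITION & SPEC =====
-- Pre_ = exactly the inputs on which Python A returns (no exception): pos in range and,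
-- scanning left from the addressed position over the run of 'z', the first non-'z'
-- character (if any) is 'a'..'y' (anything else raises ValueError in alphabet.index).
def Pre_increment_name (name : String) (pos : Int) : Prop :=
  -(name.toList.length : Int) ≤ pos ∧ pos < (name.toList.length : Int) ∧
  (((name.toList.take ((if 0 ≤ pos then pos else pos + name.toList.length).toNat + 1)).reverse.dropWhile
      (fun c => c == 'z')).head?.all (fun c => decide ('a' ≤ c) && decide (c ≤ 'y')) = true)
instance (name : String) (pos : Int) : Decidable (Pre_increment_name name pos) := by
  unfold Pre_increment_name; infer_instance

def pvWitness_increment_name : String × Int := ("hazz", -1)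

def Spec_increment_name (name : String) (pos : Int) (out : String) : Prop := out = increment_name_alt name pos
instance (name : String) (pos : Int) (out : String) : Decidable (Spec_increment_name name pos out) := by unfold Spec_increment_name; infer_instance

-- ===== CLAIM (what is proved, stated in full; the proofs are below) =====
def Claim_equal_increment_name : Prop := ∀ (name : String) (pos : Int), Dom_increment_name name pos → Pre_increment_name name pos → Spec_increment_name name pos (increment_name name pos)

-- ===== LEMMAS AND PROOFS =====

theorem find_z : PySem.Chars.find abet ['z'] = 25 := by decide

theorem eq_z_of_find25 (c : Char) (h : PySem.Chars.find abet [c] = 25) : c = 'z' := by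
  have hs := PySem.Chars.find_spec (s := abet) (sub := [c]) (by rw [h]; norm_num)
  rw [h] at hs
  have hpre := hs.1
  have hd : List.drop (25:Int).toNat abet = ['z'] := by decide
  rw [hd] at hpre
  rcases hpre with ⟨t, ht⟩
  cases t with
  | nil => simp at ht; exact ht
  | cons a b => simp at ht

-- A's recursion and B's loop take the same step over the same state, so with equal fuel
-- they return the same list.
theorem go_eq (fuel : Nat) : ∀ (s : List Char) (pos : Int), incAGo fuel s pos = incBGo fuel s pos := by
  induction fuel with
  | zero => intro s pos; rfl
  | succ fuel ih =>
    intro s pos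
    rw [incAGo, incBGo]
    cases hget : PySem.List.pyGet? s pos with
    | none => rfl
    | some c =>
      dsimp only
      by_cases hz : c = 'z'
      · subst hz
        rw [find_z]
        have h25 : ¬ ((25:Int) < 0) := by norm_num
        have hlen : (25:Int) = (abet.length : Int) - 1 := by decide
        rw [if_neg h25, if_pos hlen, if_pos rfl]
        have hrep : pyReplace s pos ['a'] =
            PySem.List.slice s none (some pos) ++ ['a'] ++
              PySem.List.slice s (some (pos + (s.length : Int) + 1)) none := rfl
        rw [hrep]
        have hmul : pos * -1 = -pos := by ring
        rw [hmul]
        split_ifs with h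
        · rfl
        · exact ih _ _
      · rw [if_neg hz]
        by_cases hneg : PySem.Chars.find abet [c] < 0
        · rw [if_pos hneg, if_pos hneg]
        · rw [if_neg hneg, if_neg hneg]
          have h25 : ¬ PySem.Chars.find abet [c] = (abet.length : Int) - 1 := by
            intro h
            exact hz (eq_z_of_find25 c (by rw [h]; decide))
          rw [if_neg h25]
          rfl

theorem main_lemma (s : List Char) (pos : Int) : incA s pos = incB s pos := by
  rw [incA, incB]; exact go_eq _ s pos

-- ===== VERDICT (by name: the statement is the Claim_ definition above) =====
theorem increment_name_spec : Claim_equal_increment_name := by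
  intro name pos _ _
  unfold Spec_increment_name increment_name increment_name_alt
  rw [main_lemma]
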